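-- pv_equiv track=rewrite | github.com/miliar/Code_Jam_Webscraper | solutions_python/Problem_201/2938.py | judgeMaxMax
-- ===== SOURCE A (Python) =====
-- def maxLR(i, L):
--     if (L[i][1] < L[i][2]):
--         return (L[i][2])
--     elif (L[i][1] > L[i][2]):
--         return (L[i][1])
--     else:
--         return (L[i][1])
--
-- def judgeMaxMax(J, L):
--     JDD = []
--     res = []
--     da = -1
--     for i in J:
--         JDD.append([i, maxLR(i, L)])
--     for j in JDD:
--         if (j[1] > da):
--             da = j[1]
--     for k in JDD:
--         if (k[1] == da):
--             res.append(k[0])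
--     return (res)
-- ===== SOURCE B (Python) =====
-- def judgeMaxMax(J, L):
--     best = -1
--     res = []
--     for i in J:
--         v = max(L[i][1], L[i][2])
--         if v > best:
--             best = v
--             res = [i]
--         elif v == best:
--             res.append(i)
--     return res
-- ===== Notes on version B (the rewrite author's own statement) =====
-- stated objective: simpler
-- what changed: Replaces A's three passes (build [index,value] pairs, scan for the max, scan again to filter) with a single running-max pass that resets/extends the result list in place; the maxLR helper is inlined as max().
import Mathlib
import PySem

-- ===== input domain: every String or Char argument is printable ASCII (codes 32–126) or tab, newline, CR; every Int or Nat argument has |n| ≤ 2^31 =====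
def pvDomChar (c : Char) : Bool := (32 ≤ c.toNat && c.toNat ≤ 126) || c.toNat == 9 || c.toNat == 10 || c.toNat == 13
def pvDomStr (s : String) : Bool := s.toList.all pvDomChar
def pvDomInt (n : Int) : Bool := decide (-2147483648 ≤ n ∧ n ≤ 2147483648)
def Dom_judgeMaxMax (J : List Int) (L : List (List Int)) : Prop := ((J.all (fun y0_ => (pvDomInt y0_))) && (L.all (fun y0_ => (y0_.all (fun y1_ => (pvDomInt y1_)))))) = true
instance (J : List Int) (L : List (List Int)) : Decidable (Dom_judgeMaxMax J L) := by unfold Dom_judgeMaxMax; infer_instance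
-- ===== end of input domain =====

-- B folds A's three passes (build pairs, find max, filter) into one running-max pass; objective: simpler.


-- ===== PORT A =====
-- L[i][1], L[i][2] via pyGet?; .getD is only reached on inputs outside Pre_ (where Python raises)
def maxLR (i : Int) (L : List (List Int)) : Int :=
  let a := (PySem.List.pyGet? ((PySem.List.pyGet? L i).getD []) 1).getD 0
  let b := (PySem.List.pyGet? ((PySem.List.pyGet? L i).getD []) 2).getD 0
  if a < b then b else if a > b then a else a

def judgeMaxMax (J : List Int) (L : List (List Int)) : List Int :=
  let JDD : List (Int × Int) := J.foldl (fun acc i => acc ++ [(i, maxLR i L)]) []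
  let da : Int := JDD.foldl (fun d j => if j.2 > d then j.2 else d) (-1)
  JDD.foldl (fun r k => if k.2 = da then r ++ [k.1] else r) []

-- ===== PORT B =====
def judgeMaxMax_alt (J : List Int) (L : List (List Int)) : List Int :=
  (J.foldl (fun (s : Int × List Int) i =>
      let v := max ((PySem.List.pyGet? ((PySem.List.pyGet? L i).getD []) 1).getD 0)
                   ((PySem.List.pyGet? ((PySem.List.pyGet? L i).getD []) 2).getD 0)
      if v > s.1 then (v, [i]) else if v = s.1 then (s.1, s.2 ++ [i]) else s)
    ((-1 : Int), ([] : List Int))).2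

-- ===== PRECONDITION & SPEC =====
-- Pre_ excludes exactly the inputs where Python A raises: some i in J is out of range of L
-- (pyGet? = none ⇒ getD [] has length 0 < 3) or row L[i] has fewer than 3 entries (IndexError).
def Pre_judgeMaxMax (J : List Int) (L : List (List Int)) : Prop :=
  ∀ i ∈ J, 3 ≤ ((PySem.List.pyGet? L i).getD []).length
instance (J : List Int) (L : List (List Int)) : Decidable (Pre_judgeMaxMax J L) := by
  unfold Pre_judgeMaxMax; infer_instance

def pvWitness_judgeMaxMax : List Int × List (List Int) :=
  ([0, 1, 0], [[7, 2, 5], [1, 5, 3]])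

def Spec_judgeMaxMax (J : List Int) (L : List (List Int)) (out : List Int) : Prop := out = judgeMaxMax_alt J L
instance (J : List Int) (L : List (List Int)) (out : List Int) : Decidable (Spec_judgeMaxMax J L out) := by unfold Spec_judgeMaxMax; infer_instance

-- ===== CLAIM (what is proved, stated in full; the proofs are below) =====
def Claim_equal_judgeMaxMax : Prop := ∀ (J : List Int) (L : List (List Int)), Dom_judgeMaxMax J L → Pre_judgeMaxMax J L → Spec_judgeMaxMax J L (judgeMaxMax J L)

-- ===== LEMMAS AND PROOFS =====

-- the running maximum of maxLR over J, seeded with b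
def pvD (L : List (List Int)) (J : List Int) (b : Int) : Int :=
  J.foldl (fun d i => if maxLR i L > d then maxLR i L else d) b

lemma pvD_le (L : List (List Int)) (J : List Int) : ∀ b : Int, b ≤ pvD L J b := by
  induction J with
  | nil => intro b; simp [pvD]
  | cons i J ih =>
    intro b
    simp only [pvD, List.foldl_cons]
    split
    · exact le_trans (by omega) (ih _)
    · exact ih _

lemma pvD_cons (L : List (List Int)) (i : Int) (J : List Int) (b : Int) :
    pvD L (i :: J) b = pvD L J (if maxLR i L > b then maxLR i L else b) := rfl

-- A's first pass builds the pair list J.map (i ↦ (i, maxLR i L))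
lemma pvJDD (L : List (List Int)) (J : List Int) :
    ∀ acc : List (Int × Int),
      J.foldl (fun acc i => acc ++ [(i, maxLR i L)]) acc = acc ++ J.map (fun i => (i, maxLR i L)) := by
  induction J with
  | nil => simp
  | cons i J ih => intro acc; simp [ih]

-- A's third pass is a filter
lemma pvRes (L : List (List Int)) (da : Int) (J : List Int) :
    ∀ acc : List Int,
      J.foldl (fun r i => if maxLR i L = da then r ++ [i] else r) acc
        = acc ++ J.filter (fun i => maxLR i L = da) := by
  induction J with
  | nil => simp
  | cons i J ih =>
    intro acc
    simp only [List.foldl_cons, List.filter_cons]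
    by_cases h : maxLR i L = da <;> simp [h, ih]

-- B's single pass: the invariant relating its state to the running max and the final filter
lemma pvBfold (L : List (List Int)) (J : List Int) :
    ∀ (b : Int) (r : List Int),
      (J.foldl (fun (s : Int × List Int) i =>
          let v := maxLR i L
          if v > s.1 then (v, [i]) else if v = s.1 then (s.1, s.2 ++ [i]) else s) (b, r))
        = (pvD L J b, (if pvD L J b = b then r else []) ++ J.filter (fun i => maxLR i L = pvD L J b)) := by
  induction J with
  | nil => intro b r; simp [pvD]
  | cons i J ih =>
    intro b r
    simp only [List.foldl_cons, List.filter_cons, pvD_cons]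
    by_cases h1 : maxLR i L > b
    · simp only [if_pos h1]
      rw [ih]
      have hle : maxLR i L ≤ pvD L J (maxLR i L) := pvD_le L J _
      set v := maxLR i L with hv
      set D := pvD L J v with hD
      clear_value v D
      have hne : ¬ D = b := by omega
      rw [if_neg hne]
      by_cases hc : v = D
      · rw [if_pos hc.symm]
        simp [hc]
      · rw [if_neg (fun e => hc e.symm)]
        simp [hc]
    · simp only [if_neg h1]
      by_cases h2 : maxLR i L = b
      · simp only [if_pos h2]
        rw [ih]
        have hle : b ≤ pvD L J b := pvD_le L J b
        set v := maxLR i L with hv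
        set D := pvD L J b with hD
        clear_value v D
        by_cases hc : D = b
        · have hvD : v = D := by omega
          simp [hc, hvD]
        · have hvD : ¬ v = D := by omega
          simp [hc, hvD]
      · simp only [if_neg h2]
        rw [ih]
        have hle : b ≤ pvD L J b := pvD_le L J b
        set v := maxLR i L with hv
        set D := pvD L J b with hD
        clear_value v D
        have hvD : ¬ v = D := by omega
        simp [hvD]

-- B's inline max(...) computes exactly maxLR
lemma pvV (L : List (List Int)) (i : Int) :
    max ((PySem.List.pyGet? ((PySem.List.pyGet? L i).getD []) 1).getD 0)
        ((PySem.List.pyGet? ((PySem.List.pyGet? L i).getD []) 2).getD 0) = maxLR i L := by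
  simp only [maxLR]
  split <;> rename_i h
  · omega
  · split <;> omega

lemma judgeMaxMax_eq (J : List Int) (L : List (List Int)) :
    judgeMaxMax J L = judgeMaxMax_alt J L := by
  have hB : judgeMaxMax_alt J L
      = (J.foldl (fun (s : Int × List Int) i =>
          let v := maxLR i L
          if v > s.1 then (v, [i]) else if v = s.1 then (s.1, s.2 ++ [i]) else s)
        ((-1 : Int), ([] : List Int))).2 := by
    simp only [judgeMaxMax_alt, pvV]
  rw [hB, pvBfold]
  simp only [judgeMaxMax, pvJDD, List.nil_append, List.foldl_map]
  rw [show (List.foldl (fun x y => if maxLR y L > x then maxLR y L else x) (-1 : Int) J) = pvD L J (-1) from rfl,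
      pvRes]
  split <;> simp

-- ===== VERDICT (by name: the statement is the Claim_ definition above) =====
theorem judgeMaxMax_spec : Claim_equal_judgeMaxMax := by
  intro J L _ _
  unfold Spec_judgeMaxMax
  exact judgeMaxMax_eq J L
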